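-- pv_equiv track=rewrite | github.com/BensonP/School-Projects | CS312/My Python file!.py | fibExp
-- ===== SOURCE A (Python) =====
-- def fibExp(n):
--     if n == 0:
--         return 1
--     if n == 1:
--         return 1
--     if n == 2:
--         return 1
--     return (fibExp(n-1) + fibExp(n-2) * fibExp(n-3))
-- ===== SOURCE B (Python) =====
-- def fibExp(n):
--     a, b, c = 1, 1, 1
--     for _ in range(n - 2):
--         a, b, c = b, c, c + b * a
--     return c
-- ===== Notes on version B (the rewrite author's own statement) =====
-- stated objective: alternative
-- what changed: Replaced the exponential three-way recursion with an iterative loop carrying the last three values (DP), a linear number of arithmetic operations.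
-- crash fix: For n < 0 A recurses without a base case and raises RecursionError; B's loop runs zero times and returns 1. — e.g. on fibExp(-1): A raises RecursionError, B returns 1
import Mathlib
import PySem

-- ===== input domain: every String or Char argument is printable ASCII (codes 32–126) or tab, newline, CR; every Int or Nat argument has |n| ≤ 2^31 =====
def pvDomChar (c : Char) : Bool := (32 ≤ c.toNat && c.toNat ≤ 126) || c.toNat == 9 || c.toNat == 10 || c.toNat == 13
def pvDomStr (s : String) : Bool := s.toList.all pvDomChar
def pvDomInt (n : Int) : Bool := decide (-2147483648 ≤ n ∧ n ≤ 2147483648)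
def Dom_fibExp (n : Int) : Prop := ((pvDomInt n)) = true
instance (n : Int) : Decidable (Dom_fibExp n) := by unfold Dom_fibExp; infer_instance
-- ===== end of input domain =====

-- B replaces the triple recursion by an iterative loop keeping the last three values.

-- ===== PORT A =====
-- A recurses fibExp(n-1)+fibExp(n-2)*fibExp(n-3); for n ≥ 0 this is structural
-- recursion on the Nat value of n, transcribed literally here.
def fibExpNat : Nat → Int
  | 0 => 1
  | 1 => 1
  | 2 => 1
  | (m + 3) => fibExpNat (m + 2) + fibExpNat (m + 1) * fibExpNat m

def fibExp (n : Int) : Int := fibExpNat n.toNat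

-- ===== PORT B =====
-- the loop body: (a, b, c) = (b, c, c + b * a), run k times
def fibLoop : Nat → Int × Int × Int → Int × Int × Int
  | 0, s => s
  | (k + 1), (a, b, c) => fibLoop k (b, c, c + b * a)

def fibExp_alt (n : Int) : Int := (fibLoop (n - 2).toNat (1, 1, 1)).2.2

-- ===== PRECONDITION & SPEC =====
-- Pre_ excludes n < 0, on which the Python A recurses without a base case and raises RecursionError.
def Pre_fibExp (n : Int) : Prop := 0 ≤ n
instance (n : Int) : Decidable (Pre_fibExp n) := by unfold Pre_fibExp; infer_instance
def pvWitness_fibExp : Int := 6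

-- For n < 0 A recurses without a base case and raises RecursionError; B's loop runs zero times and returns 1.
def Raises_fibExp (n : Int) : Prop := n < 0
instance (n : Int) : Decidable (Raises_fibExp n) := by unfold Raises_fibExp; infer_instance
def pvRaiseWitness_fibExp : Int := -1
def pvRaiseWitnessOut_fibExp : Int := 1

def Spec_fibExp (n : Int) (out : Int) : Prop := out = fibExp_alt n
instance (n : Int) (out : Int) : Decidable (Spec_fibExp n out) := by unfold Spec_fibExp; infer_instance

-- ===== CLAIM (what is proved, stated in full; the proofs are below) =====
def Claim_equal_fibExp : Prop := ∀ (n : Int), Dom_fibExp n → Pre_fibExp n → Spec_fibExp n (fibExp n)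
def Claim_raises_fibExp : Prop := (∀ (n : Int), Dom_fibExp n → Raises_fibExp n → ¬ Pre_fibExp n) ∧ (Dom_fibExp (pvRaiseWitness_fibExp) ∧ Raises_fibExp (pvRaiseWitness_fibExp) ∧ fibExp_alt (pvRaiseWitness_fibExp) = pvRaiseWitnessOut_fibExp)

-- ===== LEMMAS AND PROOFS =====

-- loop invariant: starting from three consecutive values of A's sequence,
-- k steps of the loop advance the window by k
theorem fibLoop_inv (k m : Nat) :
    fibLoop k (fibExpNat m, fibExpNat (m + 1), fibExpNat (m + 2)) =
      (fibExpNat (m + k), fibExpNat (m + k + 1), fibExpNat (m + k + 2)) := by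
  induction k generalizing m with
  | zero => simp [fibLoop]
  | succ k ih =>
    have : fibExpNat (m + 2) + fibExpNat (m + 1) * fibExpNat m = fibExpNat (m + 3) := by
      simp [fibExpNat]
    rw [fibLoop, this]
    have h := ih (m + 1)
    have e1 : m + 1 + k = m + (k + 1) := by omega
    rw [e1] at h
    exact h

theorem alt_eq_on_nat (m : Nat) : fibExp_alt (m : Int) = fibExpNat m := by
  unfold fibExp_alt
  match m with
  | 0 => decide
  | 1 => decide
  | 2 => decide
  | (k + 3) =>
    have ht : ((k + 3 : Nat) : Int) - 2 = ((k + 1 : Nat) : Int) := by push_cast; ring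
    rw [ht, Int.toNat_natCast]
    have h := fibLoop_inv (k + 1) 0
    simp only [Nat.zero_add] at h
    show (fibLoop (k + 1) (fibExpNat 0, fibExpNat 1, fibExpNat 2)).2.2 = _
    rw [h]

-- ===== VERDICT (by name: the statement is the Claim_ definition above) =====
theorem fibExp_spec : Claim_equal_fibExp := by
  intro n _ hpre
  unfold Spec_fibExp fibExp
  have h := alt_eq_on_nat n.toNat
  rw [Int.toNat_of_nonneg hpre] at h
  exact h.symm

@[simp] theorem fibExp_raises : Claim_raises_fibExp := by
  unfold Claim_raises_fibExp
  exact ⟨fun n _ hr hp => absurd hp (by unfold Pre_fibExp Raises_fibExp at *; omega), by decide⟩
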